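-- pv_equiv track=rewrite | github.com/xinyuran/RLRefine | core/post_process.py | find_min_span_in_text
-- ===== SOURCE A (Python) =====
-- def find_min_span_in_text(keyword, original_text):
--     """
--     Find the minimum contiguous span in the original text that matches all characters of the keyword.
--
--     Uses a greedy algorithm: starting from each occurrence of the keyword's first character
--     in the text, sequentially searches forward for remaining characters to compute the
--     minimum span needed.
--
--     Args:
--         keyword: The keyword to match
--         original_text: The original text
--
--     Returns:
--         Length of the minimum matching span, or -1 if no match is found
--     """
--     if not keyword or not original_text:
--         return -1
--
--     # Filter out spaces from keyword
--     keyword_chars = [c for c in keyword if c != ' ']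
--     if not keyword_chars:
--         return -1
--
--     min_span = float('inf')
--
--     # Find all positions of the first character in the text
--     first_char = keyword_chars[0]
--     start_positions = [i for i, c in enumerate(original_text) if c == first_char]
--
--     # For each start position, attempt greedy matching
--     for start_pos in start_positions:
--         current_pos = start_pos
--         matched = True
--
--         # Match remaining characters sequentially
--         for i, char in enumerate(keyword_chars):
--             if i == 0:
--                 continue  # First character already matched
--
--             # Search forward from current position for the next character
--             found = False
--             for j in range(current_pos + 1, len(original_text)):
--                 if original_text[j] == char:
--                     current_pos = j
--                     found = True
--                     break
--
--             if not found:
--                 matched = False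
--                 break
--
--         if matched:
--             # Calculate the span of this match (from start to last matched position)
--             span = current_pos - start_pos + 1
--             min_span = min(min_span, span)
--
--     return min_span if min_span != float('inf') else -1
-- ===== SOURCE B (Python) =====
-- def find_min_span_in_text(keyword, original_text):
--     if not keyword or not original_text:
--         return -1
--     keyword_chars = [c for c in keyword if c != ' ']
--     if not keyword_chars:
--         return -1
--     n = len(original_text)
--     first = keyword_chars[0]
--     rest = keyword_chars[1:]
--     # one backward pass per needed character: tables[c][i] = least j >= i with
--     # original_text[j] == c, or -1 if there is none (index i ranges over 0..n)
--     tables = {}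
--     for c in rest:
--         if c not in tables:
--             arr = [-1] * (n + 1)
--             last = -1
--             for i in range(n - 1, -1, -1):
--                 if original_text[i] == c:
--                     last = i
--                 arr[i] = last
--             tables[c] = arr
--     rest_tabs = [tables[c] for c in rest]
--     best = -1
--     for start in range(n):
--         if original_text[start] != first:
--             continue
--         cur = start
--         ok = True
--         for tab in rest_tabs:
--             j = tab[cur + 1]
--             if j < 0:
--                 ok = False
--                 break
--             cur = j
--         if ok:
--             span = cur - start + 1
--             if best == -1 or span < best:
--                 best = span
--     return best
-- ===== Notes on version B (the rewrite author's own statement) =====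
-- stated objective: faster
-- what changed: Replaces A's repeated linear forward scans (one per keyword character per start position) by precomputed next-occurrence tables (one backward pass per distinct keyword character), making each greedy step a constant-time table lookup.
import Mathlib
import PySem

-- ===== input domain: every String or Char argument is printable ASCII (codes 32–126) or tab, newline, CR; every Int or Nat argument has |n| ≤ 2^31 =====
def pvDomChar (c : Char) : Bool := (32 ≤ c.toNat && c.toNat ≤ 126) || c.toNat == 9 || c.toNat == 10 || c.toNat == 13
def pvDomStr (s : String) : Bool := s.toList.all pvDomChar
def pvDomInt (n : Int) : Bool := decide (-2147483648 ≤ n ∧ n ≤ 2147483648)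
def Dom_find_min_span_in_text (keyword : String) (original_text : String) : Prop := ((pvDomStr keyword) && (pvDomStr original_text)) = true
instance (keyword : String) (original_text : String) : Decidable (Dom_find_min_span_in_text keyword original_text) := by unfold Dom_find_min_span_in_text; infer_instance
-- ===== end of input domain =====

-- B replaces A's repeated linear forward scans by precomputed next-occurrence tables
-- (one backward pass per distinct keyword character), making each greedy step a table lookup.

-- ===== PORT A =====
-- the inner 'for j in range(current_pos + 1, len(original_text)): if original_text[j] == char: … break'
def pvScanA (l : List Char) (c : Char) (j : Int) : Option Int :=
  if h : j < (l.length : Int) then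
    if PySem.List.pyGetD l j ' ' = c then some j
    else pvScanA l c (j + 1)
  else none
termination_by ((l.length : Int) - j).toNat
decreasing_by omega

-- the 'for i, char in enumerate(keyword_chars): … if not found: matched = False; break' loop (tail = chars after the first)
def pvMatchA (l : List Char) : List Char → Int → Option Int
  | [], cur => some cur
  | c :: cs, cur =>
    match pvScanA l c (cur + 1) with
    | some j => pvMatchA l cs j
    | none => none

def find_min_span_in_text (keyword : String) (original_text : String) : Int :=
  if keyword.toList = [] ∨ original_text.toList = [] then -1
  else
    match keyword.toList.filter (fun c => c != ' ') with
    | [] => -1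
    | first :: rest =>
      -- min_span : Option Int, none = float('inf')
      match (((PySem.List.enumerate original_text.toList 0).filter (fun p => p.2 == first)).map (·.1)).foldl
          (fun (m : Option Int) s =>
            match pvMatchA original_text.toList rest s with
            | some e => some (match m with | none => e - s + 1 | some v => min v (e - s + 1))
            | none => m) none with
      | none => -1
      | some v => v

-- ===== PORT B =====
-- Source B's backward pass 'for i in range(n - 1, -1, -1): if original_text[i] == c: last = i; arr[i] = last'
-- (state = (arr, last); arr starts as [-1] * (n + 1))
def pvBuildNxt (l : List Char) (c : Char) : List Int :=
  ((PySem.List.pyRange ((l.length : Int) - 1) (-1) (-1)).foldl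
    (fun (st : List Int × Int) i =>
      if PySem.List.pyGetD l i ' ' = c then (PySem.List.pySetD st.1 i i, i)
      else (PySem.List.pySetD st.1 i st.2, st.2))
    (List.replicate (l.length + 1) (-1), -1)).1

-- 'for c in rest: if c not in tables: tables[c] = <backward pass>'
def pvTables (l : List Char) (rest : List Char) : PySem.Dict Char (List Int) :=
  rest.foldl (fun d c => if d.contains c then d else d.insert c (pvBuildNxt l c)) PySem.Dict.empty

-- 'for tab in rest_tabs: j = tab[cur + 1]; if j < 0: break; cur = j'
def pvMatchB : List (List Int) → Int → Option Int
  | [], cur => some cur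
  | tab :: ts, cur =>
    if PySem.List.pyGetD tab (cur + 1) 0 < 0 then none
    else pvMatchB ts (PySem.List.pyGetD tab (cur + 1) 0)

def find_min_span_in_text_alt (keyword : String) (original_text : String) : Int :=
  if keyword.toList = [] ∨ original_text.toList = [] then -1
  else
    match keyword.toList.filter (fun c => c != ' ') with
    | [] => -1
    | first :: rest =>
      (PySem.List.pyRange 0 (original_text.toList.length : Int) 1).foldl
        (fun (best : Int) s =>
          if PySem.List.pyGetD original_text.toList s ' ' ≠ first then best  -- 'continue'
          else
            match pvMatchB (rest.map fun c => (pvTables original_text.toList rest).getD c []) s with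
            | some e => if best = -1 ∨ e - s + 1 < best then e - s + 1 else best
            | none => best) (-1)

-- ===== PRECONDITION & SPEC =====
def Spec_find_min_span_in_text (keyword : String) (original_text : String) (out : Int) : Prop := out = find_min_span_in_text_alt keyword original_text
instance (keyword : String) (original_text : String) (out : Int) : Decidable (Spec_find_min_span_in_text keyword original_text out) := by unfold Spec_find_min_span_in_text; infer_instance

-- ===== CLAIM (what is proved, stated in full; the proofs are below) =====
def Claim_equal_find_min_span_in_text : Prop := ∀ (keyword : String) (original_text : String), Dom_find_min_span_in_text keyword original_text → Spec_find_min_span_in_text keyword original_text (find_min_span_in_text keyword original_text)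

-- ===== LEMMAS AND PROOFS =====

theorem pvGetD_set_ne (l : List Int) (i j : Nat) (v d : Int) (hne : j ≠ i) :
    (l.set i v).getD j d = l.getD j d := by
  by_cases hj : j < l.length
  · rw [List.getD_eq_getElem _ _ (by simpa using hj), List.getD_eq_getElem _ _ hj]
    exact List.getElem_set_ne (by omega) _
  · rw [List.getD_eq_default _ _ (by simpa using hj), List.getD_eq_default _ _ (by omega)]

theorem pvGetD_set_self (l : List Int) (i : Nat) (v d : Int) (h : i < l.length) :
    (l.set i v).getD i d = v := by
  rw [List.getD_eq_getElem _ _ (by simpa using h)]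
  exact List.getElem_set_self _

theorem pvScanA_none (l : List Char) (c : Char) (s : Int) (hs : (l.length : Int) ≤ s) :
    pvScanA l c s = none := by
  rw [pvScanA, dif_neg (by omega)]

theorem pvScanA_some_bounds (l : List Char) (c : Char) (s j : Int)
    (h : pvScanA l c s = some j) : s ≤ j ∧ j < (l.length : Int) := by
  have key : ∀ n : Nat, ∀ s j : Int, ((l.length : Int) - s).toNat ≤ n →
      pvScanA l c s = some j → s ≤ j ∧ j < (l.length : Int) := by
    intro n
    induction n with
    | zero =>
      intro s j hn h
      rw [pvScanA] at h
      by_cases hlt : s < (l.length : Int)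
      · omega
      · rw [dif_neg hlt] at h; cases h
    | succ n ih =>
      intro s j hn h
      rw [pvScanA] at h
      by_cases hlt : s < (l.length : Int)
      · rw [dif_pos hlt] at h
        by_cases hc : PySem.List.pyGetD l s ' ' = c
        · rw [if_pos hc] at h
          cases h
          omega
        · rw [if_neg hc] at h
          have := ih (s + 1) j (by omega) h
          omega
      · rw [dif_neg hlt] at h; cases h
  exact key ((l.length : Int) - s).toNat s j le_rfl h

theorem pvBuildNxt_loop (l : List Char) (c : Char) :
    ∀ (i0 : Nat), i0 ≤ l.length → ∀ (arr0 : List Int), arr0.length = l.length + 1 →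
      (((PySem.List.pyRange ((i0 : Int) - 1) (-1) (-1)).foldl
        (fun (st : List Int × Int) i =>
          if PySem.List.pyGetD l i ' ' = c then (PySem.List.pySetD st.1 i i, i)
          else (PySem.List.pySetD st.1 i st.2, st.2))
        (arr0, (pvScanA l c i0).getD (-1))).1.length = l.length + 1) ∧
      (∀ j : Nat, j ≤ l.length →
        ((PySem.List.pyRange ((i0 : Int) - 1) (-1) (-1)).foldl
          (fun (st : List Int × Int) i =>
            if PySem.List.pyGetD l i ' ' = c then (PySem.List.pySetD st.1 i i, i)
            else (PySem.List.pySetD st.1 i st.2, st.2))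
          (arr0, (pvScanA l c i0).getD (-1))).1.getD j 0
          = if j < i0 then (pvScanA l c (j : Int)).getD (-1) else arr0.getD j 0) := by
  intro i0
  induction i0 with
  | zero =>
    intro _ arr0 hlen
    rw [show ((0 : Nat) : Int) - 1 = -1 by norm_num, PySem.List.pyRange_neg_one_eq_nil (by omega)]
    simp only [List.foldl_nil]
    exact ⟨hlen, fun j hj => by rw [if_neg (by omega)]⟩
  | succ i0 ih =>
    intro hi0 arr0 hlen
    have hcons : ((i0 + 1 : Nat) : Int) - 1 = (i0 : Int) := by push_cast; ring
    rw [hcons, PySem.List.pyRange_neg_one_cons (by omega), List.foldl_cons]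
    have hsc : pvScanA l c (i0 : Int)
        = if PySem.List.pyGetD l (i0 : Int) ' ' = c then some (i0 : Int)
          else pvScanA l c ((i0 + 1 : Nat) : Int) := by
      rw [pvScanA, dif_pos (by omega)]
      push_cast
      ring_nf
    by_cases hgc : PySem.List.pyGetD l (i0 : Int) ' ' = c
    · rw [if_pos hgc]
      have hlast : (pvScanA l c (i0 : Int)).getD (-1) = (i0 : Int) := by
        rw [hsc, if_pos hgc]; rfl
      have harr : PySem.List.pySetD arr0 (i0 : Int) (i0 : Int) = arr0.set i0 (i0 : Int) :=
        PySem.List.pySetD_natCast arr0 i0 (i0 : Int)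
      rw [show ((PySem.List.pySetD arr0 (i0 : Int) (i0 : Int), (i0 : Int)) : List Int × Int)
          = (arr0.set i0 (i0 : Int), (pvScanA l c (i0 : Int)).getD (-1)) by rw [harr, hlast]]
      obtain ⟨ihlen, ihget⟩ := ih (by omega) (arr0.set i0 (i0 : Int)) (by simpa using hlen)
      refine ⟨ihlen, fun j hj => ?_⟩
      rw [ihget j hj]
      by_cases hji : j < i0
      · rw [if_pos hji, if_pos (by omega)]
      · rcases Nat.eq_or_lt_of_le (Nat.le_of_not_lt hji) with rfl | hj2
        · rw [if_neg (by omega), if_pos (by omega)]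
          rw [pvGetD_set_self _ _ _ _ (by omega), hlast]
        · rw [if_neg (by omega), if_neg (by omega)]
          exact pvGetD_set_ne _ _ _ _ _ (by omega)
    · rw [if_neg hgc]
      have hlast : (pvScanA l c ((i0 + 1 : Nat) : Int)).getD (-1)
          = (pvScanA l c (i0 : Int)).getD (-1) := by
        rw [hsc, if_neg hgc]
      have harr : PySem.List.pySetD arr0 (i0 : Int) ((pvScanA l c ((i0 + 1 : Nat) : Int)).getD (-1))
          = arr0.set i0 ((pvScanA l c (i0 : Int)).getD (-1)) := by
        rw [hlast]; exact PySem.List.pySetD_natCast arr0 i0 _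
      rw [show ((PySem.List.pySetD arr0 (i0 : Int) ((pvScanA l c ((i0 + 1 : Nat) : Int)).getD (-1)),
            (pvScanA l c ((i0 + 1 : Nat) : Int)).getD (-1)) : List Int × Int)
          = (arr0.set i0 ((pvScanA l c (i0 : Int)).getD (-1)), (pvScanA l c (i0 : Int)).getD (-1)) by
            rw [harr, hlast]]
      obtain ⟨ihlen, ihget⟩ := ih (by omega) (arr0.set i0 ((pvScanA l c (i0 : Int)).getD (-1)))
        (by simpa using hlen)
      refine ⟨ihlen, fun j hj => ?_⟩
      rw [ihget j hj]
      by_cases hji : j < i0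
      · rw [if_pos hji, if_pos (by omega)]
      · rcases Nat.eq_or_lt_of_le (Nat.le_of_not_lt hji) with rfl | hj2
        · rw [if_neg (by omega), if_pos (by omega)]
          exact pvGetD_set_self _ _ _ _ (by omega)
        · rw [if_neg (by omega), if_neg (by omega)]
          exact pvGetD_set_ne _ _ _ _ _ (by omega)

theorem pvBuildNxt_spec (l : List Char) (c : Char) :
    (pvBuildNxt l c).length = l.length + 1 ∧
    ∀ j : Nat, j ≤ l.length →
      (pvBuildNxt l c).getD j 0 = (pvScanA l c (j : Int)).getD (-1) := by
  have hinit : ((-1 : Int)) = (pvScanA l c (l.length : Int)).getD (-1) := by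
    rw [pvScanA_none l c _ le_rfl]; rfl
  unfold pvBuildNxt
  obtain ⟨hlen, hget⟩ := pvBuildNxt_loop l c l.length le_rfl
    (List.replicate (l.length + 1) (-1)) (by simp)
  rw [← hinit] at hlen hget
  refine ⟨hlen, fun j hj => ?_⟩
  rw [hget j hj]
  by_cases hji : j < l.length
  · rw [if_pos hji]
  · rw [if_neg hji]
    have hjl : j = l.length := by omega
    subst hjl
    rw [pvScanA_none l c _ le_rfl, List.getD_eq_getElem _ _ (by simp)]
    simp

theorem pvTables_getD (l : List Char) (rest : List Char) (c : Char) (hc : c ∈ rest) :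
    (pvTables l rest).getD c [] = pvBuildNxt l c := by
  unfold pvTables
  have key : ∀ (cs : List Char) (d : PySem.Dict Char (List Int)),
      (∀ x, d.contains x = true → d.getD x [] = pvBuildNxt l x) →
      ∀ x, (x ∈ cs ∨ d.contains x = true) →
        (cs.foldl (fun d c => if d.contains c then d else d.insert c (pvBuildNxt l c)) d).getD x []
          = pvBuildNxt l x := by
    intro cs
    induction cs with
    | nil =>
      rintro d hd x (hx | hx)
      · cases hx
      · exact hd x hx
    | cons a t ih =>
      intro d hd x hx
      simp only [List.foldl_cons]
      by_cases hda : d.contains a = true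
      · rw [if_pos hda]
        apply ih d hd
        rcases hx with hx | hx
        · rcases List.mem_cons.1 hx with rfl | hxt
          · exact Or.inr hda
          · exact Or.inl hxt
        · exact Or.inr hx
      · rw [if_neg hda]
        apply ih (d.insert a (pvBuildNxt l a))
        · intro y hy
          rw [PySem.Dict.contains_insert] at hy
          by_cases hya : y = a
          · subst hya
            rw [PySem.Dict.getD_insert_self]
          · rw [PySem.Dict.getD_insert_of_ne _ _ _ hya]
            apply hd
            simpa [hya] using hy
        · rcases hx with hx | hx
          · rcases List.mem_cons.1 hx with rfl | hxt
            · exact Or.inr (PySem.Dict.contains_insert_self _ _ _)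
            · exact Or.inl hxt
          · refine Or.inr ?_
            rw [PySem.Dict.contains_insert, hx, Bool.or_true]
  apply key rest PySem.Dict.empty
  · intro x hx
    rw [PySem.Dict.contains_empty] at hx
    cases hx
  · exact Or.inl hc

theorem pvMatch_eq (l : List Char) (t : Char → List Int) :
    ∀ (cs : List Char), (∀ c ∈ cs, t c = pvBuildNxt l c) →
      ∀ cur : Int, 0 ≤ cur → cur < (l.length : Int) →
        pvMatchA l cs cur = pvMatchB (cs.map t) cur := by
  intro cs
  induction cs with
  | nil => intro _ cur _ _; rfl
  | cons c cs ih =>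
    intro ht cur h0 hcl
    simp only [List.map_cons, pvMatchA, pvMatchB, ht c List.mem_cons_self]
    obtain ⟨hblen, hbget⟩ := pvBuildNxt_spec l c
    have hidx : PySem.List.pyGetD (pvBuildNxt l c) (cur + 1) 0
        = (pvScanA l c (cur + 1)).getD (-1) := by
      have hcast : (((cur + 1).toNat : Nat) : Int) = cur + 1 := by omega
      have h1 := PySem.List.pyGetD_natCast (pvBuildNxt l c) (cur + 1).toNat (0 : Int)
      rw [hcast] at h1
      rw [h1, hbget (cur + 1).toNat (by omega), hcast]
    rw [hidx]
    cases hsc : pvScanA l c (cur + 1) with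
    | none =>
      rw [if_pos (by norm_num)]
    | some jv =>
      obtain ⟨hj1, hj2⟩ := pvScanA_some_bounds l c (cur + 1) jv hsc
      rw [if_neg (by simp only [Option.getD_some]; omega)]
      simp only [Option.getD_some]
      exact ih (fun x hx => ht x (List.mem_cons_of_mem c hx)) jv (by omega) hj2

theorem pvMatchA_ge (l : List Char) (rest : List Char) (cur : Int) (e : Int)
    (he : pvMatchA l rest cur = some e) : cur ≤ e := by
  induction rest generalizing cur with
  | nil =>
    simp only [pvMatchA, Option.some.injEq] at he
    omega
  | cons c cs ih =>
    simp only [pvMatchA] at he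
    cases hs : pvScanA l c (cur + 1) with
    | none => rw [hs] at he; cases he
    | some j =>
      rw [hs] at he
      obtain ⟨hj1, _⟩ := pvScanA_some_bounds l c (cur + 1) j hs
      have := ih j he
      omega

theorem pvStarts_eq (l : List Char) (first : Char) :
    ((PySem.List.enumerate l 0).filter (fun p => p.2 == first)).map (·.1)
      = (PySem.List.pyRange 0 (l.length : Int) 1).filter
          (fun s => decide (PySem.List.pyGetD l s ' ' = first)) := by
  rw [PySem.List.enumerate_eq_map_pyRange l ' ']
  rw [List.filter_map, List.map_map]
  have h1 : (PySem.List.pyRange 0 (PySem.List.len l) 1) = (PySem.List.pyRange 0 (l.length : Int) 1) := by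
    rw [PySem.List.len_eq]
  rw [h1]
  have h2 : ((fun x => x.1) ∘ fun j => (j, PySem.List.pyGetD l j ' ')) = fun j => j := rfl
  rw [h2, List.map_id']
  apply List.filter_congr
  intro x _
  show ((fun p => p.2 == first) ∘ fun j => ((j : Int), PySem.List.pyGetD l j ' ')) x
      = decide (PySem.List.pyGetD l x ' ' = first)
  by_cases h : PySem.List.pyGetD l x ' ' = first <;> simp [h]

theorem pvFold_eq (l : List Char) (rest : List Char) (starts : List Int)
    (hs : ∀ s ∈ starts, 0 ≤ s ∧ s < (l.length : Int))
    (ht : ∀ c ∈ rest, (pvTables l rest).getD c [] = pvBuildNxt l c) :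
    ∀ (m : Option Int) (best : Int),
      ((m = none ∧ best = -1) ∨ (∃ v, m = some v ∧ best = v ∧ 1 ≤ v)) →
      (match starts.foldl
          (fun (m : Option Int) s =>
            match pvMatchA l rest s with
            | some e => some (match m with | none => e - s + 1 | some v => min v (e - s + 1))
            | none => m) m with
        | none => -1
        | some v => v)
      = starts.foldl
          (fun (best : Int) s =>
            match pvMatchB (rest.map fun c => (pvTables l rest).getD c []) s with
            | some e => if best = -1 ∨ e - s + 1 < best then e - s + 1 else best
            | none => best) best := by
  induction starts with
  | nil =>
    rintro m best (⟨rfl, rfl⟩ | ⟨v, rfl, rfl, hv⟩) <;> rfl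
  | cons s t ih =>
    intro m best hrel
    obtain ⟨hs0, hsl⟩ := hs s List.mem_cons_self
    have htail : ∀ y ∈ t, 0 ≤ y ∧ y < (l.length : Int) :=
      fun y hy => hs y (List.mem_cons_of_mem s hy)
    simp only [List.foldl_cons]
    rw [← pvMatch_eq l (fun c => (pvTables l rest).getD c []) rest ht s hs0 hsl]
    cases hm : pvMatchA l rest s with
    | none => exact ih htail m best hrel
    | some e =>
      have hse := pvMatchA_ge l rest s e hm
      dsimp only
      rcases hrel with ⟨rfl, rfl⟩ | ⟨v, rfl, rfl, hv⟩
      · rw [if_pos (Or.inl rfl)]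
        exact ih htail _ _ (Or.inr ⟨e - s + 1, rfl, rfl, by omega⟩)
      · dsimp only
        by_cases hsp : e - s + 1 < best
        · rw [if_pos (Or.inr hsp)]
          have hmin : min best (e - s + 1) = e - s + 1 := by omega
          rw [hmin]
          exact ih htail _ _ (Or.inr ⟨e - s + 1, rfl, rfl, by omega⟩)
        · rw [if_neg (by omega)]
          have hmin : min best (e - s + 1) = best := by omega
          rw [hmin]
          exact ih htail _ _ (Or.inr ⟨best, rfl, rfl, hv⟩)

-- ===== VERDICT (by name: the statement is the Claim_ definition above) =====
theorem find_min_span_in_text_spec : Claim_equal_find_min_span_in_text := by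
  intro keyword original_text _
  unfold Spec_find_min_span_in_text find_min_span_in_text find_min_span_in_text_alt
  split
  · rfl
  · cases hkc : keyword.toList.filter (fun c => c != ' ') with
    | nil => rfl
    | cons first rest =>
      dsimp only
      have hflip : (PySem.List.pyRange 0 (original_text.toList.length : Int) 1).foldl
          (fun (best : Int) s =>
            if PySem.List.pyGetD original_text.toList s ' ' ≠ first then best
            else
              match pvMatchB (rest.map fun c => (pvTables original_text.toList rest).getD c []) s with
              | some e => if best = -1 ∨ e - s + 1 < best then e - s + 1 else best
              | none => best) (-1)
          = (PySem.List.pyRange 0 (original_text.toList.length : Int) 1).foldl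
          (fun (best : Int) s =>
            if PySem.List.pyGetD original_text.toList s ' ' = first then
              (match pvMatchB (rest.map fun c => (pvTables original_text.toList rest).getD c []) s with
              | some e => if best = -1 ∨ e - s + 1 < best then e - s + 1 else best
              | none => best)
            else best) (-1) := by
        apply PySem.List.foldl_congr_mem
        intro acc x _
        rw [ite_not]
      rw [hflip, PySem.List.foldl_ite_eq_foldl_filter, ← pvStarts_eq]
      apply pvFold_eq original_text.toList rest _ _ (pvTables_getD original_text.toList rest)
        none (-1) (Or.inl ⟨rfl, rfl⟩)
      intro s hsmem
      rw [pvStarts_eq, List.mem_filter] at hsmem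
      have := PySem.List.mem_pyRange_one.1 hsmem.1
      omega
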